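-- pv_equiv track=rewrite | github.com/kevintomsgithub/leetcode | reverse.py | reverse_old
-- ===== SOURCE A (Python) =====
-- def reverse_old(x):
--     y = []
--     x_str = list(str(abs(x)))
--     for i in reversed(x_str):
--         y.append(i)
--     z = int(''.join(y))
--     if z > 2**31 - 1:
--         return 0
--     if x < 0:
--         z *= -1
--     return z
-- ===== SOURCE B (Python) =====
-- def reverse_old(x):
--     n = abs(x)
--     z = 0
--     while n > 0:
--         z = z * 10 + n % 10
--         n //= 10
--     if z > 2**31 - 1:
--         return 0
--     return -z if x < 0 else z
-- ===== Notes on version B (the rewrite author's own statement) =====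
-- stated objective: idiomatic
-- what changed: Replaces building a reversed character list from str(abs(x)) and re-parsing it with int() by a purely arithmetic digit-extraction loop (z = z*10 + n%10; n //= 10), never constructing a string or list.
import Mathlib
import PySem

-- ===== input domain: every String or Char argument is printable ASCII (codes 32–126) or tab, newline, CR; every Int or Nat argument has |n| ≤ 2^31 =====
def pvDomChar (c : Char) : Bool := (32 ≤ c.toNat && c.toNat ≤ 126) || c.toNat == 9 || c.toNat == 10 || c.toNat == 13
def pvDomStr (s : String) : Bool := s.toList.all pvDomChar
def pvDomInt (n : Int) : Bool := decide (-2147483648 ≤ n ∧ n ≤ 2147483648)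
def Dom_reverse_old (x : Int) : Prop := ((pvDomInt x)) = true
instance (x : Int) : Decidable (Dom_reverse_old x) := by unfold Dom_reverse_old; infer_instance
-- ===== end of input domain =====

-- B replaces A's string-reversal-and-reparse by an arithmetic digit-extraction loop (idiomatic; same cost).


-- ===== PORT A =====
-- hand port of Python's int(s): here s = ''.join(y) is always the NONEMPTY ALL-DIGIT string
-- produced by reversing str(abs(x)), and on such strings int(s) is exactly this positional fold
-- (no sign, no whitespace, no underscores can occur); exact on that domain.
def pyIntOfDigits (cs : List Char) : Int :=
  Int.ofNat (cs.foldl (fun a c => 10 * a + (c.toNat - 48)) 0)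

def reverse_old (x : Int) : Int :=
  -- y = []; x_str = list(str(abs(x)))
  let x_str : List Char := PySem.Int.toChars |x|
  -- for i in reversed(x_str): y.append(i)
  let y : List Char := x_str.reverse.foldl (fun acc c => acc ++ [c]) ([] : List Char)
  -- z = int(''.join(y))
  let z : Int := pyIntOfDigits y
  if z > 2 ^ 31 - 1 then 0
  else if x < 0 then -z else z

-- ===== PORT B =====
-- while n > 0: z = z * 10 + n % 10; n //= 10
def revLoop (n z : Int) : Int :=
  if h : 0 < n then revLoop (PySem.Int.floordiv n 10) (z * 10 + PySem.Int.mod n 10) else z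
termination_by n.toNat
decreasing_by
  simp only [PySem.Int.floordiv_eq_ediv_of_pos (by omega : (0:Int) < 10)]
  omega

def reverse_old_alt (x : Int) : Int :=
  let z := revLoop |x| 0
  if z > 2 ^ 31 - 1 then 0
  else if x < 0 then -z else z

-- ===== PRECONDITION & SPEC =====
def Spec_reverse_old (x : Int) (out : Int) : Prop := out = reverse_old_alt x
instance (x : Int) (out : Int) : Decidable (Spec_reverse_old x out) := by unfold Spec_reverse_old; infer_instance

-- ===== CLAIM (what is proved, stated in full; the proofs are below) =====
def Claim_equal_reverse_old : Prop := ∀ (x : Int), Dom_reverse_old x → Spec_reverse_old x (reverse_old x)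

-- ===== LEMMAS AND PROOFS =====

-- Nat-level mirror of B's loop
def revNat (n z : Nat) : Nat :=
  if h : 0 < n then revNat (n / 10) (z * 10 + n % 10) else z
termination_by n
decreasing_by omega

theorem revLoop_natCast (n : Nat) : ∀ z : Nat, revLoop (n : Int) (z : Int) = ((revNat n z : Nat) : Int) := by
  induction n using Nat.strong_induction_on with
  | _ n ih =>
    intro z
    rw [revLoop, revNat]
    by_cases h : 0 < n
    · have hi : (0 : Int) < (n : Int) := by exact_mod_cast h
      rw [dif_pos hi, dif_pos h,
        PySem.Int.floordiv_eq_ediv_of_pos (by omega : (0:Int) < 10),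
        PySem.Int.mod_eq_emod_of_pos (by omega : (0:Int) < 10)]
      have := ih (n / 10) (Nat.div_lt_self h (by omega)) (z * 10 + n % 10)
      push_cast at this ⊢
      exact this
    · have hi : ¬ (0 : Int) < (n : Int) := by exact_mod_cast h
      rw [dif_neg hi, dif_neg h]

theorem digitChar_val {d : Nat} (h : d < 10) : (Nat.digitChar d).toNat - 48 = d := by
  interval_cases d <;> decide

-- folding A's reversed digit string equals B's loop (Nat level), for positive m
theorem foldl_toDigits_reverse (m : Nat) (hm : 0 < m) :
    ∀ acc : Nat, ((Nat.toDigits 10 m).reverse).foldl (fun a c => 10 * a + (c.toNat - 48)) acc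
      = revNat m acc := by
  induction m using Nat.strong_induction_on with
  | _ m ih =>
    intro acc
    rcases Nat.lt_or_ge m 10 with hlt | hge
    · rw [Nat.toDigits_of_lt_base hlt]
      rw [revNat]
      simp only [hm, dif_pos]
      rw [revNat]
      have h10 : m / 10 = 0 := Nat.div_eq_of_lt hlt
      have hmod : m % 10 = m := Nat.mod_eq_of_lt hlt
      simp only [h10, hmod, List.reverse_cons, List.reverse_nil, List.nil_append,
        List.foldl_cons, List.foldl_nil, digitChar_val hlt]
      rw [revNat]
      simp only [Nat.lt_irrefl, dif_neg, not_false_iff]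
      omega
    · rw [Nat.toDigits_of_base_le (by omega) hge]
      rw [revNat]
      simp only [hm, dif_pos]
      have hq : 0 < m / 10 := Nat.div_pos hge (by omega)
      have hqlt : m / 10 < m := Nat.div_lt_self hm (by omega)
      rw [List.reverse_append]
      simp only [List.reverse_cons, List.reverse_nil, List.nil_append, List.singleton_append,
        List.foldl_cons]
      rw [ih (m / 10) hqlt hq, digitChar_val (Nat.mod_lt m (by omega))]
      congr 1
      omega

theorem z_eq (x : Int) :
    pyIntOfDigits ((PySem.Int.toChars |x|).reverse.foldl (fun acc c => acc ++ [c]) ([] : List Char))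
      = revLoop |x| 0 := by
  rw [PySem.List.foldl_append_singleton]
  simp only [List.nil_append]
  have habs : |x| = ((x.natAbs : Nat) : Int) := by
    rw [Int.abs_eq_natAbs]
  rw [habs]
  have htc : PySem.Int.toChars ((x.natAbs : Nat) : Int) = Nat.toDigits 10 x.natAbs := by
    rw [PySem.Int.toChars, if_neg (by omega : ¬ (((x.natAbs : Nat) : Int) < 0))]
    congr 1
  rw [htc]
  have h0 : (0 : Int) = ((0 : Nat) : Int) := rfl
  rw [h0, revLoop_natCast]
  unfold pyIntOfDigits
  rcases Nat.eq_zero_or_pos x.natAbs with hz | hp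
  · rw [hz]
    rw [revNat]
    simp [Nat.toDigits_zero]
  · rw [foldl_toDigits_reverse _ hp 0]
    rfl

-- ===== VERDICT (by name: the statement is the Claim_ definition above) =====
theorem reverse_old_spec : Claim_equal_reverse_old := by
  intro x _
  unfold Spec_reverse_old
  simp only [reverse_old, reverse_old_alt, z_eq]
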